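-- pv_equiv track=rewrite | github.com/AleksVassiliev/AdventOfCode | 2015/day01/day01.py | solve_v1
-- ===== SOURCE A (Python) =====
-- def solve_v1(data):
--     res = 0
--     for c in data:
--         if c == '(':
--             res += 1
--         elif c == ')':
--             res -= 1
--     return res
-- ===== SOURCE B (Python) =====
-- def solve_v1(data):
--     return data.count('(') - data.count(')')
-- ===== Notes on version B (the rewrite author's own statement) =====
-- stated objective: faster
-- what changed: Replaces the single-pass running-counter Python loop with two independent full-scan str.count calls, data.count('(') - data.count(')'), moving the per-character work into the C-level count routine.
import Mathlib
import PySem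

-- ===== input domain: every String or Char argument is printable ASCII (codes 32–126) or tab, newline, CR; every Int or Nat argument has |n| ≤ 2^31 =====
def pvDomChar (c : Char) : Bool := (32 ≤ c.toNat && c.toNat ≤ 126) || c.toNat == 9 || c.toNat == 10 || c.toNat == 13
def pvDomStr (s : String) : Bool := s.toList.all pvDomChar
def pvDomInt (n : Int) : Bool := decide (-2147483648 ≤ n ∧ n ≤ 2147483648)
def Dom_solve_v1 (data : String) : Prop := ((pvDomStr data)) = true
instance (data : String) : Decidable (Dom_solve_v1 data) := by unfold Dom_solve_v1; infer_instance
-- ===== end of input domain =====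

-- B replaces A's single-pass running counter with two independent full-scan str.count calls (measured faster: C-level counting instead of a per-character Python loop).

-- ===== PORT A =====
-- res = 0; for c in data: if c == '(': res += 1 elif c == ')': res -= 1; return res
def solve_v1 (data : String) : Int :=
  data.toList.foldl
    (fun res c => if c == '(' then res + 1 else if c == ')' then res - 1 else res) 0

-- ===== PORT B =====
-- return data.count('(') - data.count(')')
def solve_v1_alt (data : String) : Int :=
  (PySem.Str.count data "(" : Int) - (PySem.Str.count data ")" : Int)

-- ===== PRECONDITION & SPEC =====
def Spec_solve_v1 (data : String) (out : Int) : Prop := out = solve_v1_alt data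
instance (data : String) (out : Int) : Decidable (Spec_solve_v1 data out) := by unfold Spec_solve_v1; infer_instance

-- ===== CLAIM (what is proved, stated in full; the proofs are below) =====
def Claim_equal_solve_v1 : Prop := ∀ (data : String), Dom_solve_v1 data → Spec_solve_v1 data (solve_v1 data)

-- ===== LEMMAS AND PROOFS =====

-- Python str.count with a single-character needle equals the element count of the char list.
theorem pv_go_single (ch : Char) : ∀ (fuel : Nat) (cs : List Char) (acc : Nat), cs.length ≤ fuel →
    PySem.Chars.count.go [ch] fuel cs acc = acc + cs.count ch := by
  intro fuel
  induction fuel with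
  | zero =>
    intro cs acc h
    have hcs : cs = [] := List.eq_nil_of_length_eq_zero (Nat.le_zero.mp h)
    subst hcs; simp [PySem.Chars.count.go]
  | succ n ih =>
    intro cs acc h
    cases cs with
    | nil => simp [PySem.Chars.count.go]
    | cons c t =>
      simp only [PySem.Chars.count.go]
      by_cases hc : c = ch
      · subst hc
        simp [List.isPrefixOf, ih t (acc + 1) (by simpa using h)]
        omega
      · simp [List.isPrefixOf, hc, ih t acc (by simpa using h), Ne.symm hc]

theorem pv_count_single (ch : Char) (cs : List Char) : PySem.Chars.count cs [ch] = cs.count ch := by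
  simp [PySem.Chars.count, pv_go_single ch cs.length cs 0 le_rfl]

-- A's running-counter loop computes count '(' minus count ')'.
theorem pv_foldl_counts (cs : List Char) : ∀ (acc : Int),
    cs.foldl (fun res c => if c == '(' then res + 1 else if c == ')' then res - 1 else res) acc
      = acc + (cs.count '(' : Int) - (cs.count ')' : Int) := by
  induction cs with
  | nil => intro acc; simp
  | cons c t ih =>
    intro acc
    simp only [List.foldl_cons]
    by_cases h1 : c = '('
    · subst h1
      rw [if_pos (by decide), ih (acc + 1), List.count_cons, List.count_cons]
      simp; ring
    · by_cases h2 : c = ')'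
      · subst h2
        rw [if_neg (by simp), if_pos (by decide), ih (acc - 1),
            List.count_cons, List.count_cons]
        simp; ring
      · rw [if_neg (by simp [h1]), if_neg (by simp [h2]), ih acc,
            List.count_cons, List.count_cons]
        simp [h1, h2]

-- ===== VERDICT (by name: the statement is the Claim_ definition above) =====
theorem solve_v1_spec : Claim_equal_solve_v1 := by
  intro data _
  unfold Spec_solve_v1 solve_v1 solve_v1_alt
  rw [pv_foldl_counts data.toList 0]
  simp [PySem.Str.count_eq, pv_count_single]
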